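-- pv_equiv track=rewrite | github.com/BrayanTorres2/Aprende_a_programar_Eanx | pacman.py | get_horizontal_lines
-- ===== SOURCE A (Python) =====
-- def has_top(row,col,grid):
--   return row > 0 and grid[row-1][col] == "#"
--
-- def has_bottom(row,col,grid):
--   return row < len(grid)-1 and grid[row+1][col] == "#"
--
-- def get_horizontal_lines(grid):
--   lines = []
--   for row in range(len(grid)):
--     p1 = None
--     for col in range(len(grid[row])):
--       if grid[row][col] == "#":
--         if p1 is None:
--           p1 = (row, col)
--         if col+1 < len(grid[row]) and grid[row][col+1] == "#":
--           if has_top(row,col,grid) and has_bottom(row,col,grid):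
--             if has_top(row,col+1,grid) and has_bottom(row,col+1,grid):
--               p2 = (row, col)
--               if p1 != p2:
--                 lines.append((p1, p2))
--               p1 = None
--         else:
--           p2 = (row, col)
--           if p1 != p2:
--             lines.append((p1, (row, col)))
--           p1 = None
--   return lines
-- ===== SOURCE B (Python) =====
-- def has_top(row, col, grid):
--   return row > 0 and grid[row-1][col] == "#"
--
-- def has_bottom(row, col, grid):
--   return row < len(grid)-1 and grid[row+1][col] == "#"
--
-- def _is_junction_pair(row, col, grid):
--   return (has_top(row, col, grid) and has_bottom(row, col, grid)
--           and has_top(row, col+1, grid) and has_bottom(row, col+1, grid))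
--
-- def get_horizontal_lines(grid):
--   lines = []
--   for row in range(len(grid)):
--     cells = grid[row]
--     # phase 1: collect the maximal contiguous runs of '#' cells as (start, end)
--     runs = []
--     start = None
--     for col in range(len(cells)):
--       if cells[col] == "#":
--         if start is None:
--           start = col
--       elif start is not None:
--         runs.append((start, col - 1))
--         start = None
--     if start is not None:
--       runs.append((start, len(cells) - 1))
--     # phase 2: cut each run at interior junction pairs; keep non-degenerate segments
--     for a, b in runs:
--       seg = a
--       for c in range(a, b):
--         if _is_junction_pair(row, c, grid):
--           if seg != c:
--             lines.append(((row, seg), (row, c)))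
--           seg = c + 1
--       if seg != b:
--         lines.append(((row, seg), (row, b)))
--   return lines
-- ===== Notes on version B (the rewrite author's own statement) =====
-- stated objective: alternative
-- what changed: A's single stateful scan per row (pending-start variable updated and emitted inline) is replaced by a two-phase decomposition: first collect the maximal contiguous '#' runs of each row, then cut each run at interior junction-pair columns and emit the non-degenerate sub-segments.
import Mathlib
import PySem

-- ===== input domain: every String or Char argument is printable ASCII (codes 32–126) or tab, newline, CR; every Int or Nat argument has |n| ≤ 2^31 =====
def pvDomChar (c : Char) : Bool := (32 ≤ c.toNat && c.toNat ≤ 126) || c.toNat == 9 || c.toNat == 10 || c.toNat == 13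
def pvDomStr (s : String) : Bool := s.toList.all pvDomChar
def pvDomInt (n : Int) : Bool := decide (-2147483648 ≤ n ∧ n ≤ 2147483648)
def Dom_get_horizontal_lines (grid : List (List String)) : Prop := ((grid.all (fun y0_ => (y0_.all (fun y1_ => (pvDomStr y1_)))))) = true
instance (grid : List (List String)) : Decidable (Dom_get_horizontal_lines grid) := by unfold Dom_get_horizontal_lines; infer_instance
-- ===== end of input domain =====

-- B replaces A's single stateful scan by a two-phase decomposition per row (collect maximal '#'
-- runs, then cut each run at interior junction pairs); objective: alternative decomposition, not speed.

-- ===== PORT A =====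
def pvHasTop (grid : List (List String)) (row col : Nat) : Bool :=
  decide (0 < row) && ((grid.getD (row - 1) []).getD col "" == "#")

def pvHasBottom (grid : List (List String)) (row col : Nat) : Bool :=
  decide (row + 1 < grid.length) && ((grid.getD (row + 1) []).getD col "" == "#")

-- one iteration of A's inner `for col` loop; state = (lines, p1)
def pvAStep (grid : List (List String)) (row : Nat) (cells : List String)
    (st : List ((Int × Int) × (Int × Int)) × Option (Int × Int)) (col : Nat) :
    List ((Int × Int) × (Int × Int)) × Option (Int × Int) :=
  let lines := st.1
  let p0 := st.2
  if cells.getD col "" == "#" then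
    let p1 : Int × Int := match p0 with
      | none => ((row : Int), (col : Int))
      | some p => p
    if decide (col + 1 < cells.length) && (cells.getD (col + 1) "" == "#") then
      if pvHasTop grid row col && pvHasBottom grid row col &&
         pvHasTop grid row (col + 1) && pvHasBottom grid row (col + 1) then
        let p2 : Int × Int := ((row : Int), (col : Int))
        (if p1 ≠ p2 then lines ++ [(p1, p2)] else lines, none)
      else (lines, some p1)
    else
      let p2 : Int × Int := ((row : Int), (col : Int))
      (if p1 ≠ p2 then lines ++ [(p1, p2)] else lines, none)
  else (lines, p0)

def get_horizontal_lines (grid : List (List String)) : List ((Int × Int) × (Int × Int)) :=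
  (List.range grid.length).foldl
    (fun lines row =>
      let cells := grid.getD row []
      ((List.range cells.length).foldl (pvAStep grid row cells) (lines, none)).1)
    []

-- ===== PORT B =====
-- Source B's has_top/has_bottom are the same module helpers as A's; shared here as pvHasTop/pvHasBottom
def pvIsJunctionPair (grid : List (List String)) (row col : Nat) : Bool :=
  pvHasTop grid row col && pvHasBottom grid row col &&
  pvHasTop grid row (col + 1) && pvHasBottom grid row (col + 1)

-- phase 1 step: state = (runs, start)
def pvRunStep (cells : List String) (st : List (Nat × Nat) × Option Nat) (col : Nat) :
    List (Nat × Nat) × Option Nat :=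
  let runs := st.1
  let start := st.2
  if cells.getD col "" == "#" then
    (runs, match start with | none => some col | some s => some s)
  else match start with
    | some s => (runs ++ [(s, col - 1)], none)
    | none => (runs, none)

def pvRuns (cells : List String) : List (Nat × Nat) :=
  let r := (List.range cells.length).foldl (pvRunStep cells) ([], none)
  match r.2 with
  | some s => r.1 ++ [(s, cells.length - 1)]
  | none => r.1

-- phase 2 step: state = (lines, seg)
def pvSplitStep (grid : List (List String)) (row : Nat)
    (st : List ((Int × Int) × (Int × Int)) × Nat) (c : Nat) :
    List ((Int × Int) × (Int × Int)) × Nat :=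
  let lines := st.1
  let seg := st.2
  if pvIsJunctionPair grid row c then
    (if seg ≠ c then lines ++ [(((row : Int), (seg : Int)), ((row : Int), (c : Int)))] else lines,
     c + 1)
  else (lines, seg)

def get_horizontal_lines_alt (grid : List (List String)) : List ((Int × Int) × (Int × Int)) :=
  (List.range grid.length).foldl
    (fun lines row =>
      let cells := grid.getD row []
      (pvRuns cells).foldl
        (fun lines ab =>
          let r := (List.range' ab.1 (ab.2 - ab.1)).foldl (pvSplitStep grid row) (lines, ab.1)
          if r.2 ≠ ab.2 then r.1 ++ [(((row : Int), (r.2 : Int)), ((row : Int), (ab.2 : Int)))]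
          else r.1)
        lines)
    []

-- ===== PRECONDITION & SPEC =====
-- the index accesses A's neighbour tests actually perform at a '#','#' pair, in Python's
-- short-circuit order; an in-bounds check before each access ("p → q" written as "!p || q")
def pvSafe (grid : List (List String)) (r c : Nat) : Bool :=
  let up := grid.getD (r - 1) []
  let dn := grid.getD (r + 1) []
  (!decide (0 < r)) ||
    (decide (c < up.length) &&
      ((!(up.getD c "" == "#")) ||
        (!decide (r + 1 < grid.length)) ||
        (decide (c < dn.length) &&
          ((!(dn.getD c "" == "#")) ||
            (decide (c + 1 < up.length) &&
              ((!(up.getD (c + 1) "" == "#")) || decide (c + 1 < dn.length)))))))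

-- Pre_ excludes exactly the grids on which Python A raises IndexError: a ragged grid where some
-- adjacent '#','#' pair makes has_top/has_bottom index past the end of the row above or below.
def Pre_get_horizontal_lines (grid : List (List String)) : Prop :=
  ((List.range grid.length).all (fun r =>
    (List.range (grid.getD r []).length).all (fun c =>
      (!decide (c + 1 < (grid.getD r []).length)) ||
      (!((grid.getD r []).getD c "" == "#")) ||
      (!((grid.getD r []).getD (c + 1) "" == "#")) ||
      pvSafe grid r c))) = true

instance (grid : List (List String)) : Decidable (Pre_get_horizontal_lines grid) := by
  unfold Pre_get_horizontal_lines; infer_instance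

def pvWitness_get_horizontal_lines : List (List String) :=
  [["#", "#", "#", ".", "#"], ["x", "#", ".", "#", "#"], [".", "#", "#", "#"]]

def Spec_get_horizontal_lines (grid : List (List String)) (out : List ((Int × Int) × (Int × Int))) : Prop := out = get_horizontal_lines_alt grid
instance (grid : List (List String)) (out : List ((Int × Int) × (Int × Int))) : Decidable (Spec_get_horizontal_lines grid out) := by unfold Spec_get_horizontal_lines; infer_instance

-- ===== CLAIM (what is proved, stated in full; the proofs are below) =====
def Claim_equal_get_horizontal_lines : Prop := ∀ (grid : List (List String)), Dom_get_horizontal_lines grid → Pre_get_horizontal_lines grid → Spec_get_horizontal_lines grid (get_horizontal_lines grid)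

-- ===== LEMMAS AND PROOFS =====

-- is the cell at column c of this row "#"?  (out of range reads "" and is not "#")
def pvHc (cells : List String) (c : Nat) : Bool := cells.getD c "" == "#"

-- reference recursion for A's inner loop from column k with fuel m and pending start s:
-- returns (segments emitted, final pending start)
def pvSA (grid : List (List String)) (row : Nat) (cells : List String) :
    Nat → Nat → Option Nat → List (Nat × Nat) × Option Nat
  | 0, _, s => ([], s)
  | m + 1, k, s =>
    if pvHc cells k then
      let s' := s.getD k
      if decide (k + 1 < cells.length) && pvHc cells (k + 1) then
        if pvIsJunctionPair grid row k then
          let r := pvSA grid row cells m (k + 1) none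
          ((if s' ≠ k then [(s', k)] else []) ++ r.1, r.2)
        else pvSA grid row cells m (k + 1) (some s')
      else
        let r := pvSA grid row cells m (k + 1) none
        ((if s' ≠ k then [(s', k)] else []) ++ r.1, r.2)
    else pvSA grid row cells m (k + 1) s

-- one column of A's scan: (segments emitted at this column, new pending start)
def pvSA1 (grid : List (List String)) (row : Nat) (cells : List String) (k : Nat)
    (s : Option Nat) : List (Nat × Nat) × Option Nat :=
  if pvHc cells k then
    let s' := s.getD k
    if decide (k + 1 < cells.length) && pvHc cells (k + 1) then
      if pvIsJunctionPair grid row k then ((if s' ≠ k then [(s', k)] else []), none)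
      else ([], some s')
    else ((if s' ≠ k then [(s', k)] else []), none)
  else ([], s)

def pvEncS (row : Nat) (s : Option Nat) : Option (Int × Int) :=
  match s with
  | none => none
  | some c => some ((row : Int), (c : Int))

def pvEnc (row : Nat) (p : Nat × Nat) : (Int × Int) × (Int × Int) :=
  (((row : Int), (p.1 : Int)), ((row : Int), (p.2 : Int)))

lemma pvHc_lt {cells : List String} {k : Nat} (h : pvHc cells k = true) : k < cells.length := by
  by_contra hk
  simp [pvHc, List.getD_eq_getElem?_getD, List.getElem?_eq_none (by omega : cells.length ≤ k)] at h

lemma pvHc_out {cells : List String} {k : Nat} (h : cells.length ≤ k) : pvHc cells k = false := by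
  by_contra hk
  have := pvHc_lt (by simpa using hk)
  omega

lemma pvSA_succ (grid : List (List String)) (row : Nat) (cells : List String)
    (m k : Nat) (s : Option Nat) :
    pvSA grid row cells (m + 1) k s =
      ((pvSA1 grid row cells k s).1 ++ (pvSA grid row cells m (k + 1) (pvSA1 grid row cells k s).2).1,
       (pvSA grid row cells m (k + 1) (pvSA1 grid row cells k s).2).2) := by
  show (if pvHc cells k then _ else _) = _
  simp only [pvSA1]
  split_ifs <;> simp

lemma pvAStep_eq (grid : List (List String)) (row : Nat) (cells : List String)
    (L : List ((Int × Int) × (Int × Int))) (k : Nat) (s : Option Nat) :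
    pvAStep grid row cells (L, pvEncS row s) k =
      (L ++ ((pvSA1 grid row cells k s).1).map (pvEnc row),
       pvEncS row (pvSA1 grid row cells k s).2) := by
  cases s with
  | none =>
    simp only [pvAStep, pvSA1, pvEncS, pvHc, pvIsJunctionPair, pvHasTop, pvHasBottom, Option.getD]
    split_ifs <;> simp_all
  | some a =>
    simp only [pvAStep, pvSA1, pvEncS, pvHc, pvIsJunctionPair, pvHasTop, pvHasBottom, Option.getD]
    have hne : ((((row : Int), (a : Int)) : Int × Int) ≠ ((row : Int), (k : Int))) ↔ ¬(a = k) := by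
      simp [Prod.ext_iff]
    split_ifs <;> simp_all [pvEnc]

-- A's foldl equals the reference recursion
lemma pvA_fold (grid : List (List String)) (row : Nat) (cells : List String) :
    ∀ (m k : Nat) (L : List ((Int × Int) × (Int × Int))) (s : Option Nat),
      (List.range' k m).foldl (pvAStep grid row cells) (L, pvEncS row s) =
      (L ++ ((pvSA grid row cells m k s).1).map (pvEnc row),
       pvEncS row (pvSA grid row cells m k s).2) := by
  intro m
  induction m with
  | zero => intro k L s; simp [pvSA]
  | succ m ih =>
    intro k L s
    rw [List.range'_succ, List.foldl_cons, pvAStep_eq, ih, pvSA_succ]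
    simp

lemma pvSA_none_some (grid : List (List String)) (row : Nat) (cells : List String)
    (m k : Nat) (h : pvHc cells k = true) :
    pvSA grid row cells (m + 1) k none = pvSA grid row cells (m + 1) k (some k) := by
  simp [pvSA, h]

-- reference recursion for B's phase-1 loop
def pvRA (cells : List String) : Nat → Nat → Option Nat → List (Nat × Nat) × Option Nat
  | 0, _, s => ([], s)
  | m + 1, k, s =>
    if pvHc cells k then pvRA cells m (k + 1) (some (s.getD k))
    else
      match s with
      | some a =>
        let r := pvRA cells m (k + 1) none
        ((a, k - 1) :: r.1, r.2)
      | none => pvRA cells m (k + 1) none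

-- phase-1 result including the trailing close
def pvCloseR (cells : List String) (m k : Nat) (s : Option Nat) : List (Nat × Nat) :=
  let r := pvRA cells m k s
  r.1 ++ (match r.2 with | some a => [(a, cells.length - 1)] | none => [])

lemma pvRunStep_eq (cells : List String) (R : List (Nat × Nat)) (s : Option Nat) (col : Nat) :
    pvRunStep cells (R, s) col =
      if pvHc cells col then (R, some (s.getD col))
      else (match s with | some a => (R ++ [(a, col - 1)], none) | none => (R, none)) := by
  cases s with
  | none => simp only [pvRunStep, pvHc, Option.getD]
  | some a => simp only [pvRunStep, pvHc, Option.getD]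

-- B's phase-1 foldl equals the reference recursion
lemma pvR_fold (cells : List String) :
    ∀ (m k : Nat) (R : List (Nat × Nat)) (s : Option Nat),
      (List.range' k m).foldl (pvRunStep cells) (R, s) =
      (R ++ (pvRA cells m k s).1, (pvRA cells m k s).2) := by
  intro m
  induction m with
  | zero => intro k R s; simp [pvRA]
  | succ m ih =>
    intro k R s
    rw [List.range'_succ, List.foldl_cons]
    by_cases hk : pvHc cells k = true
    · rw [pvRunStep_eq, if_pos hk, ih]
      simp [pvRA, hk]
    · rw [pvRunStep_eq, if_neg (by simp [hk]), ih]
      cases s <;> simp [pvRA, hk]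

lemma pvRuns_eq (cells : List String) :
    pvRuns cells = pvCloseR cells cells.length 0 none := by
  unfold pvRuns pvCloseR
  rw [List.range_eq_range', pvR_fold]
  cases h : (pvRA cells cells.length 0 none).2 <;> simp [h]

-- reference recursion for B's phase-2 loop
def pvSP (grid : List (List String)) (row : Nat) : Nat → Nat → Nat → List (Nat × Nat) × Nat
  | 0, _, seg => ([], seg)
  | m + 1, c, seg =>
    if pvIsJunctionPair grid row c then
      let r := pvSP grid row m (c + 1) (c + 1)
      ((if seg ≠ c then [(seg, c)] else []) ++ r.1, r.2)
    else pvSP grid row m (c + 1) seg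

def pvRunSegs (grid : List (List String)) (row a b : Nat) : List (Nat × Nat) :=
  let r := pvSP grid row (b - a) a a
  r.1 ++ (if r.2 ≠ b then [(r.2, b)] else [])

def pvExpand (grid : List (List String)) (row : Nat) (rs : List (Nat × Nat)) : List (Nat × Nat) :=
  rs.flatMap (fun ab => pvRunSegs grid row ab.1 ab.2)

-- B's phase-2 foldl equals the reference recursion
lemma pvSP_fold (grid : List (List String)) (row : Nat) :
    ∀ (m c : Nat) (L : List ((Int × Int) × (Int × Int))) (seg : Nat),
      (List.range' c m).foldl (pvSplitStep grid row) (L, seg) =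
      (L ++ ((pvSP grid row m c seg).1).map (pvEnc row), (pvSP grid row m c seg).2) := by
  intro m
  induction m with
  | zero => intro c L seg; simp [pvSP]
  | succ m ih =>
    intro c L seg
    rw [List.range'_succ, List.foldl_cons]
    by_cases hj : pvIsJunctionPair grid row c = true
    · by_cases hs : seg = c <;>
        simp [pvSplitStep, hj, hs, pvSP, ih, pvEnc]
    · simp [pvSplitStep, hj, pvSP, ih]

-- B's per-run body appends exactly the run's segments
lemma pvRunBody (grid : List (List String)) (row : Nat)
    (L : List ((Int × Int) × (Int × Int))) (a b : Nat) :
    (let r := (List.range' a (b - a)).foldl (pvSplitStep grid row) (L, a)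
     if r.2 ≠ b then r.1 ++ [(((row : Int), (r.2 : Int)), ((row : Int), (b : Int)))] else r.1) =
    L ++ (pvRunSegs grid row a b).map (pvEnc row) := by
  rw [pvSP_fold]
  unfold pvRunSegs
  by_cases h : (pvSP grid row (b - a) a a).2 = b <;> simp [h, pvEnc]

-- skipping columns with no junction pair leaves pvSP's state unchanged
lemma pvSP_skip (grid : List (List String)) (row : Nat) :
    ∀ (d a r seg : Nat), (∀ c, a ≤ c → c < a + d → pvIsJunctionPair grid row c = false) →
      pvSP grid row (d + r) a seg = pvSP grid row r (a + d) seg := by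
  intro d
  induction d with
  | zero => intro a r seg _; simp
  | succ d ih =>
    intro a r seg h
    have ha : pvIsJunctionPair grid row a = false := h a le_rfl (by omega)
    have h1 : d + 1 + r = (d + r) + 1 := by omega
    rw [h1]
    simp only [pvSP, ha, Bool.false_eq_true, if_false]
    rw [ih (a + 1) r seg (fun c h1 h2 => h c (by omega) (by omega))]
    congr 1
    omega

lemma pvRunSegs_noSplit (grid : List (List String)) (row : Nat) {a k : Nat} (hak : a ≤ k)
    (h : ∀ c, a ≤ c → c < k → pvIsJunctionPair grid row c = false) :
    pvRunSegs grid row a k = if a ≠ k then [(a, k)] else [] := by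
  unfold pvRunSegs
  have h0 : k - a = (k - a) + 0 := by omega
  rw [h0, pvSP_skip grid row (k - a) a 0 a (fun c h1 h2 => h c h1 (by omega))]
  have h2 : a + (k - a) = k := by omega
  rw [h2]
  simp [pvSP]

-- cutting a run at its first junction-pair column
lemma pvRunSegs_split (grid : List (List String)) (row : Nat) {a k e : Nat}
    (hak : a ≤ k) (hke : k < e)
    (hns : ∀ c, a ≤ c → c < k → pvIsJunctionPair grid row c = false)
    (hj : pvIsJunctionPair grid row k = true) :
    pvRunSegs grid row a e =
      (if a ≠ k then [(a, k)] else []) ++ pvRunSegs grid row (k + 1) e := by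
  unfold pvRunSegs
  have h0 : e - a = (k - a) + ((e - (k + 1)) + 1) := by omega
  rw [h0, pvSP_skip grid row (k - a) a _ a (fun c h1 h2 => hns c h1 (by omega))]
  have h2 : a + (k - a) = k := by omega
  rw [h2]
  simp only [pvSP, hj, if_true]
  have h3 : e - (k + 1) = e - (k + 1) := rfl
  simp [List.append_assoc]

-- end column of the run that the pending start belongs to / the runs after it
def pvRunE (cells : List String) : Nat → Nat → Nat
  | 0, _ => cells.length - 1
  | m + 1, k => if pvHc cells k then pvRunE cells m (k + 1) else k - 1

def pvRunT (cells : List String) : Nat → Nat → List (Nat × Nat)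
  | 0, _ => []
  | m + 1, k => if pvHc cells k then pvRunT cells m (k + 1) else pvCloseR cells m (k + 1) none

lemma pvCloseR_some_none (cells : List String) (m k a : Nat)
    (hk : pvHc cells k = false) :
    pvCloseR cells m k (some a) = (a, k - 1) :: pvCloseR cells m k none ∨
    (m = 0 ∧ pvCloseR cells m k (some a) = [(a, cells.length - 1)] ∧
      pvCloseR cells m k none = []) := by
  cases m with
  | zero => right; simp [pvCloseR, pvRA]
  | succ m => left; simp [pvCloseR, pvRA, hk]

lemma pvRunE_ge (cells : List String) :
    ∀ (m j : Nat), j + m = cells.length → pvHc cells j = true → j ≤ pvRunE cells m j := by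
  intro m
  induction m with
  | zero => intro j hj h; have := pvHc_lt h; omega
  | succ m ih =>
    intro j hj h
    simp only [pvRunE, h, if_true]
    by_cases h1 : pvHc cells (j + 1) = true
    · have := ih (j + 1) (by omega) h1; omega
    · cases m with
      | zero => simp [pvRunE]; omega
      | succ m' => simp [pvRunE, h1]

lemma pvCloseR_head (cells : List String) :
    ∀ (m k a : Nat),
      pvCloseR cells m k (some a) = (a, pvRunE cells m k) :: pvRunT cells m k := by
  intro m
  induction m with
  | zero => intro k a; simp [pvCloseR, pvRA, pvRunE, pvRunT]
  | succ m ih =>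
    intro k a
    by_cases hk : pvHc cells k = true
    · simp only [pvCloseR, pvRA, hk, if_true, pvRunE, pvRunT, Option.getD]
      have := ih (k + 1) a
      simp only [pvCloseR] at this
      exact this
    · simp [pvCloseR, pvRA, hk, pvRunE, pvRunT]

lemma pvCloseR_step_some (cells : List String) (m k a : Nat) (hk : pvHc cells k = true) :
    pvCloseR cells (m + 1) k (some a) = pvCloseR cells m (k + 1) (some a) := by
  simp [pvCloseR, pvRA, hk, Option.getD]

-- the main correspondence: A's scan = expand (runs)
lemma pvMain (grid : List (List String)) (row : Nat) (cells : List String) :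
    ∀ (m : Nat),
      (∀ k, k + m = cells.length →
        (pvSA grid row cells m k none).1 = pvExpand grid row (pvCloseR cells m k none)) ∧
      (∀ k a, k + m = cells.length → pvHc cells k = true → a ≤ k →
        (∀ c, a ≤ c → c < k → pvIsJunctionPair grid row c = false) →
        (pvSA grid row cells m k (some a)).1 = pvExpand grid row (pvCloseR cells m k (some a))) := by
  intro m
  induction m with
  | zero =>
    constructor
    · intro k hk; simp [pvSA, pvCloseR, pvRA, pvExpand]
    · intro k a hk h _ _
      have := pvHc_lt h; omega
  | succ m ih =>
    have e2 : ∀ k a, k + (m + 1) = cells.length → pvHc cells k = true → a ≤ k →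
        (∀ c, a ≤ c → c < k → pvIsJunctionPair grid row c = false) →
        (pvSA grid row cells (m + 1) k (some a)).1 =
          pvExpand grid row (pvCloseR cells (m + 1) k (some a)) := by
      intro k a hk hH hak hns
      rw [pvCloseR_step_some cells m k a hH]
      by_cases hcont : (decide (k + 1 < cells.length) && pvHc cells (k + 1)) = true
      · have hcont2 : k + 1 < cells.length ∧ pvHc cells (k + 1) = true := by simpa using hcont
        have hlt : k + 1 < cells.length := hcont2.1
        have hk1 : pvHc cells (k + 1) = true := hcont2.2
        obtain ⟨m', rfl⟩ : ∃ m', m = m' + 1 := by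
          cases m with
          | zero => omega
          | succ m' => exact ⟨m', rfl⟩
        by_cases hj : pvIsJunctionPair grid row k = true
        · have hLHS : (pvSA grid row cells (m' + 1 + 1) k (some a)).1 =
              (if a ≠ k then [(a, k)] else []) ++
                (pvSA grid row cells (m' + 1) (k + 1) none).1 := by
            simp [pvSA, hH, hcont, hj, Option.getD]
          rw [hLHS, pvSA_none_some grid row cells m' (k + 1) hk1]
          rw [ih.2 (k + 1) (k + 1) (by omega) hk1 le_rfl (fun c h1 h2 => absurd h1 (by omega))]
          rw [pvCloseR_head, pvCloseR_head]
          have hE : k + 1 ≤ pvRunE cells (m' + 1) (k + 1) :=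
            pvRunE_ge cells (m' + 1) (k + 1) (by omega) hk1
          unfold pvExpand
          rw [List.flatMap_cons, List.flatMap_cons]
          rw [pvRunSegs_split grid row hak (by omega) hns hj]
          simp [List.append_assoc]
        · have hLHS : pvSA grid row cells (m' + 1 + 1) k (some a) =
              pvSA grid row cells (m' + 1) (k + 1) (some a) := by
            simp [pvSA, hH, hcont, hj, Option.getD]
          rw [hLHS]
          exact ih.2 (k + 1) a (by omega) hk1 (by omega)
            (fun c h1 h2 => by
              rcases Nat.lt_or_ge c k with h3 | h3
              · exact hns c h1 h3
              · have : c = k := by omega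
                subst this
                exact Bool.eq_false_iff.mpr hj)
      · have hk1 : pvHc cells (k + 1) = false := by
          by_cases hlt : k + 1 < cells.length
          · by_contra hne
            have h1 : pvHc cells (k + 1) = true := by simpa using hne
            exact hcont (by simp [hlt, h1])
          · exact pvHc_out (by omega)
        have hLHS : (pvSA grid row cells (m + 1) k (some a)).1 =
            (if a ≠ k then [(a, k)] else []) ++ (pvSA grid row cells m (k + 1) none).1 := by
          simp [pvSA, hH, hcont, Option.getD]
        rw [hLHS, ih.1 (k + 1) (by omega)]
        rcases pvCloseR_some_none cells m (k + 1) a hk1 with h | ⟨hm, h1, h2⟩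
        · rw [h]
          unfold pvExpand
          rw [List.flatMap_cons]
          have : (k + 1) - 1 = k := by omega
          rw [this, pvRunSegs_noSplit grid row hak hns]
        · subst hm
          rw [h1, h2]
          have hlen : cells.length - 1 = k := by omega
          unfold pvExpand
          simp only [List.flatMap_cons, List.flatMap_nil, hlen, List.append_nil]
          rw [pvRunSegs_noSplit grid row hak hns]
    refine ⟨?_, e2⟩
    intro k hk
    by_cases hH : pvHc cells k = true
    · rw [pvSA_none_some grid row cells m k hH]
      have hcl : pvCloseR cells (m + 1) k none = pvCloseR cells (m + 1) k (some k) := by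
        simp [pvCloseR, pvRA, hH, Option.getD]
      rw [hcl]
      exact e2 k k hk hH le_rfl (fun c h1 h2 => absurd h1 (by omega))
    · have h1 : pvSA grid row cells (m + 1) k none = pvSA grid row cells m (k + 1) none := by
        simp [pvSA, hH]
      have hcl : pvCloseR cells (m + 1) k none = pvCloseR cells m (k + 1) none := by
        simp [pvCloseR, pvRA, hH]
      rw [h1, hcl]
      exact ih.1 (k + 1) (by omega)

lemma pvFoldl_ext {α β : Type} (f g : β → α → β) :
    ∀ (l : List α) (x : β), (∀ acc y, f acc y = g acc y) → l.foldl f x = l.foldl g x := by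
  intro l
  induction l with
  | nil => intro x _; rfl
  | cons a as ih => intro x h; simp only [List.foldl_cons, h]; exact ih _ h

-- per-row equality of the two ports' inner computations
lemma pvRow_eq (grid : List (List String)) (row : Nat)
    (L : List ((Int × Int) × (Int × Int))) :
    ((List.range (grid.getD row []).length).foldl (pvAStep grid row (grid.getD row []))
      (L, none)).1 =
    (pvRuns (grid.getD row [])).foldl
      (fun lines ab =>
        let r := (List.range' ab.1 (ab.2 - ab.1)).foldl (pvSplitStep grid row) (lines, ab.1)
        if r.2 ≠ ab.2 then r.1 ++ [(((row : Int), (r.2 : Int)), ((row : Int), (ab.2 : Int)))]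
        else r.1)
      L := by
  have hA : (L, (none : Option (Int × Int))) = (L, pvEncS row none) := rfl
  rw [hA, List.range_eq_range',
    pvA_fold grid row (grid.getD row []) (grid.getD row []).length 0 L none]
  have hB : ∀ (rs : List (Nat × Nat)) (L0 : List ((Int × Int) × (Int × Int))),
      rs.foldl
        (fun lines ab =>
          let r := (List.range' ab.1 (ab.2 - ab.1)).foldl (pvSplitStep grid row) (lines, ab.1)
          if r.2 ≠ ab.2 then r.1 ++ [(((row : Int), (r.2 : Int)), ((row : Int), (ab.2 : Int)))]
          else r.1)
        L0 = L0 ++ (pvExpand grid row rs).map (pvEnc row) := by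
    intro rs
    induction rs with
    | nil => intro L0; simp [pvExpand]
    | cons ab rest ih =>
      intro L0
      rw [List.foldl_cons]
      rw [pvRunBody grid row L0 ab.1 ab.2, ih]
      unfold pvExpand
      simp [List.flatMap_cons, List.append_assoc]
  rw [pvRuns_eq, hB]
  rw [(pvMain grid row (grid.getD row [])
    (grid.getD row []).length).1 0 (by omega)]

-- ===== VERDICT (by name: the statement is the Claim_ definition above) =====
theorem get_horizontal_lines_spec : Claim_equal_get_horizontal_lines := by
  intro grid _ _
  unfold Spec_get_horizontal_lines get_horizontal_lines get_horizontal_lines_alt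
  exact pvFoldl_ext _ _ _ _ (fun acc y => pvRow_eq grid y acc)
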